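-- pv_equiv track=rewrite | github.com/FelypeKravetz/NutritAssist | main.py | definir_refeicoes
-- ===== SOURCE A (Python) =====
-- def definir_refeicoes(alimentos_recomendados):
--     refeicoes = {'Café da manhã': [], 'Lanche': [], 'Almoço': [], 'Jantar': [], 'Ceia': []}
--     # Dividir os alimentos em diferentes refeições
--     for alimento in alimentos_recomendados:
--         if alimento in ['Arroz', 'Feijao', 'Batata']:
--             refeicoes['Almoço'].append(alimento)
--         elif alimento in ['Frango', 'Carne_bovina', 'Peixe']:
--             refeicoes['Almoço'].append(alimento)
--         elif alimento in ['Ovo']: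
--             refeicoes['Café da manhã'].append(alimento)
--         elif alimento in ['Leite', 'Queijo']:
--             refeicoes['Café da manhã'].append(alimento)
--         elif alimento in ['Cenoura', 'Alface', 'Tomate']:
--             refeicoes['Almoço'].append(alimento)
--             refeicoes['Jantar'].append(alimento)
--         elif alimento in ['Banana']:
--             refeicoes['Lanche'].append(alimento)
--         elif alimento in ['Iogurte']:
--             refeicoes['Lanche'].append(alimento)
--         elif alimento in ['Biscoito']:
--             refeicoes['Lanche'].append(alimento)
--         elif alimento in ['Salada']:
--             refeicoes['Almoço'].append(alimento)
--             refeicoes['Jantar'].append(alimento)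
--         else:
--             refeicoes['Ceia'].append(alimento)
--
--     return refeicoes
-- ===== SOURCE B (Python) =====
-- _MEALS_OF = {
--     'Arroz': ('Almoço',), 'Feijao': ('Almoço',), 'Batata': ('Almoço',),
--     'Frango': ('Almoço',), 'Carne_bovina': ('Almoço',), 'Peixe': ('Almoço',),
--     'Ovo': ('Café da manhã',), 'Leite': ('Café da manhã',), 'Queijo': ('Café da manhã',),
--     'Cenoura': ('Almoço', 'Jantar'), 'Alface': ('Almoço', 'Jantar'),
--     'Tomate': ('Almoço', 'Jantar'), 'Salada': ('Almoço', 'Jantar'),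
--     'Banana': ('Lanche',), 'Iogurte': ('Lanche',), 'Biscoito': ('Lanche',),
-- }
--
-- def definir_refeicoes(alimentos_recomendados):
--     return {
--         refeicao: [a for a in alimentos_recomendados
--                    if refeicao in _MEALS_OF.get(a, ('Ceia',))]
--         for refeicao in ('Café da manhã', 'Lanche', 'Almoço', 'Jantar', 'Ceia')
--     }
-- ===== Notes on version B (the rewrite author's own statement) =====
-- stated objective: simpler
-- what changed: A's single pass with a ten-branch if/elif dispatch appending into the dict is replaced by a dict comprehension that, for each of the five meals, filters the input against a module-level food-to-meals table, defaulting unknown foods to the supper bucket.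
import Mathlib
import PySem

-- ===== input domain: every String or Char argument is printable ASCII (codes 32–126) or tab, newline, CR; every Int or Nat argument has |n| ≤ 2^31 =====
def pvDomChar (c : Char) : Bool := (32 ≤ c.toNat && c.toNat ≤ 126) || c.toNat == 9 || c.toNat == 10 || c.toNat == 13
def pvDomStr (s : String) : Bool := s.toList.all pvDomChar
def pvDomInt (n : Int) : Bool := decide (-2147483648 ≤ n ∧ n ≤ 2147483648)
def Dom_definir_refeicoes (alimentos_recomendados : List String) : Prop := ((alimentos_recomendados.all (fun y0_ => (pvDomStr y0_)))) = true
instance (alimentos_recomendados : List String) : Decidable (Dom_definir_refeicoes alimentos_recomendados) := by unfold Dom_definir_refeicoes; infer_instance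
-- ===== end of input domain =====

-- B replaces A's single pass with a per-food if/elif dispatch appending into the dict by a
-- per-meal dict comprehension filtering the input against a food→meals table (objective: simpler).

-- ===== PORT A =====
-- body of A's for-loop: the if/elif chain appending into the dict
def pvStepA (d : PySem.Dict String (List String)) (alimento : String) : PySem.Dict String (List String) :=
  if alimento ∈ ["Arroz", "Feijao", "Batata"] then
    d.modify "Almoço" [] (· ++ [alimento])
  else if alimento ∈ ["Frango", "Carne_bovina", "Peixe"] then
    d.modify "Almoço" [] (· ++ [alimento])
  else if alimento ∈ ["Ovo"] then
    d.modify "Café da manhã" [] (· ++ [alimento])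
  else if alimento ∈ ["Leite", "Queijo"] then
    d.modify "Café da manhã" [] (· ++ [alimento])
  else if alimento ∈ ["Cenoura", "Alface", "Tomate"] then
    (d.modify "Almoço" [] (· ++ [alimento])).modify "Jantar" [] (· ++ [alimento])
  else if alimento ∈ ["Banana"] then
    d.modify "Lanche" [] (· ++ [alimento])
  else if alimento ∈ ["Iogurte"] then
    d.modify "Lanche" [] (· ++ [alimento])
  else if alimento ∈ ["Biscoito"] then
    d.modify "Lanche" [] (· ++ [alimento])
  else if alimento ∈ ["Salada"] then
    (d.modify "Almoço" [] (· ++ [alimento])).modify "Jantar" [] (· ++ [alimento])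
  else
    d.modify "Ceia" [] (· ++ [alimento])

def definir_refeicoes (alimentos_recomendados : List String) : List (String × List String) :=
  let refeicoes : PySem.Dict String (List String) :=
    PySem.Dict.ofList [("Café da manhã", []), ("Lanche", []), ("Almoço", []), ("Jantar", []), ("Ceia", [])]
  (alimentos_recomendados.foldl pvStepA refeicoes).items

-- ===== PORT B =====
-- the module-level table _MEALS_OF of Source B
def pvMealsTable : PySem.Dict String (List String) :=
  PySem.Dict.ofList
    [("Arroz", ["Almoço"]), ("Feijao", ["Almoço"]), ("Batata", ["Almoço"]),
     ("Frango", ["Almoço"]), ("Carne_bovina", ["Almoço"]), ("Peixe", ["Almoço"]),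
     ("Ovo", ["Café da manhã"]), ("Leite", ["Café da manhã"]), ("Queijo", ["Café da manhã"]),
     ("Cenoura", ["Almoço", "Jantar"]), ("Alface", ["Almoço", "Jantar"]),
     ("Tomate", ["Almoço", "Jantar"]), ("Salada", ["Almoço", "Jantar"]),
     ("Banana", ["Lanche"]), ("Iogurte", ["Lanche"]), ("Biscoito", ["Lanche"])]

def definir_refeicoes_alt (alimentos_recomendados : List String) : List (String × List String) :=
  ["Café da manhã", "Lanche", "Almoço", "Jantar", "Ceia"].map
    (fun refeicao =>
      (refeicao, alimentos_recomendados.filter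
        (fun a => (pvMealsTable.getD a ["Ceia"]).contains refeicao)))

-- ===== PRECONDITION & SPEC =====
def Spec_definir_refeicoes (alimentos_recomendados : List String) (out : List (String × List String)) : Prop := out = definir_refeicoes_alt alimentos_recomendados
instance (alimentos_recomendados : List String) (out : List (String × List String)) : Decidable (Spec_definir_refeicoes alimentos_recomendados out) := by unfold Spec_definir_refeicoes; infer_instance

-- ===== CLAIM (what is proved, stated in full; the proofs are below) =====
def Claim_equal_definir_refeicoes : Prop := ∀ (alimentos_recomendados : List String), Dom_definir_refeicoes alimentos_recomendados → Spec_definir_refeicoes alimentos_recomendados (definir_refeicoes alimentos_recomendados)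

-- ===== LEMMAS AND PROOFS =====

-- B's per-meal membership predicate
def pvIn (m a : String) : Bool := (pvMealsTable.getD a ["Ceia"]).contains m

-- "append a to v iff meal m takes food a"
def pvApp (m a : String) (v : List String) : List String := if pvIn m a then v ++ [a] else v

-- one step of A's loop, described meal by meal through B's table predicate
lemma pvStepA_eq (a : String) (v1 v2 v3 v4 v5 : List String) :
    pvStepA (PySem.Dict.mk [("Café da manhã", v1), ("Lanche", v2), ("Almoço", v3), ("Jantar", v4), ("Ceia", v5)]) a =
    PySem.Dict.mk [("Café da manhã", pvApp "Café da manhã" a v1),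
                   ("Lanche", pvApp "Lanche" a v2),
                   ("Almoço", pvApp "Almoço" a v3),
                   ("Jantar", pvApp "Jantar" a v4),
                   ("Ceia", pvApp "Ceia" a v5)] := by
  by_cases h1 : a = "Arroz"
  · subst h1; rfl
  by_cases h2 : a = "Feijao"
  · subst h2; rfl
  by_cases h3 : a = "Batata"
  · subst h3; rfl
  by_cases h4 : a = "Frango"
  · subst h4; rfl
  by_cases h5 : a = "Carne_bovina"
  · subst h5; rfl
  by_cases h6 : a = "Peixe"
  · subst h6; rfl
  by_cases h7 : a = "Ovo"
  · subst h7; rfl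
  by_cases h8 : a = "Leite"
  · subst h8; rfl
  by_cases h9 : a = "Queijo"
  · subst h9; rfl
  by_cases h10 : a = "Cenoura"
  · subst h10; rfl
  by_cases h11 : a = "Alface"
  · subst h11; rfl
  by_cases h12 : a = "Tomate"
  · subst h12; rfl
  by_cases h13 : a = "Salada"
  · subst h13; rfl
  by_cases h14 : a = "Banana"
  · subst h14; rfl
  by_cases h15 : a = "Iogurte"
  · subst h15; rfl
  by_cases h16 : a = "Biscoito"
  · subst h16; rfl
  -- a is none of the 16 table foods: A's else branch, B's .get default
  have hg : pvMealsTable.getD a ["Ceia"] = ["Ceia"] := by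
    rw [show pvMealsTable = PySem.Dict.mk
      [("Arroz", ["Almoço"]), ("Feijao", ["Almoço"]), ("Batata", ["Almoço"]),
       ("Frango", ["Almoço"]), ("Carne_bovina", ["Almoço"]), ("Peixe", ["Almoço"]),
       ("Ovo", ["Café da manhã"]), ("Leite", ["Café da manhã"]), ("Queijo", ["Café da manhã"]),
       ("Cenoura", ["Almoço", "Jantar"]), ("Alface", ["Almoço", "Jantar"]),
       ("Tomate", ["Almoço", "Jantar"]), ("Salada", ["Almoço", "Jantar"]),
       ("Banana", ["Lanche"]), ("Iogurte", ["Lanche"]), ("Biscoito", ["Lanche"])] from rfl,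
      PySem.Dict.getD_eq_get?_getD]
    simp [PySem.Dict.get?_mk_cons, Ne.symm h1, Ne.symm h2, Ne.symm h3, Ne.symm h4, Ne.symm h5, Ne.symm h6, Ne.symm h7, Ne.symm h8, Ne.symm h9, Ne.symm h10, Ne.symm h11, Ne.symm h12, Ne.symm h13, Ne.symm h14, Ne.symm h15, Ne.symm h16,
          show (PySem.Dict.mk ([] : List (String × List String))).get? a = none from rfl]
  have e1 : pvIn "Café da manhã" a = false := by simp [pvIn, hg]
  have e2 : pvIn "Lanche" a = false := by simp [pvIn, hg]
  have e3 : pvIn "Almoço" a = false := by simp [pvIn, hg]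
  have e4 : pvIn "Jantar" a = false := by simp [pvIn, hg]
  have e5 : pvIn "Ceia" a = true := by simp [pvIn, hg]
  simp only [pvApp, e1, e2, e3, e4, e5, Bool.false_eq_true, if_false, if_true]
  simp only [pvStepA, List.mem_cons, List.not_mem_nil]
  simp only [h1, h2, h3, h4, h5, h6, h7, h8, h9, h10, h11, h12, h13, h14, h15, h16, or_self, or_false, if_false]
  rfl

-- loop invariant: folding A's step extends each meal's list by B's filter
lemma pv_inv (l : List String) (v1 v2 v3 v4 v5 : List String) :
    l.foldl pvStepA (PySem.Dict.mk [("Café da manhã", v1), ("Lanche", v2), ("Almoço", v3), ("Jantar", v4), ("Ceia", v5)]) =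
    PySem.Dict.mk [("Café da manhã", v1 ++ l.filter (pvIn "Café da manhã")),
                   ("Lanche", v2 ++ l.filter (pvIn "Lanche")),
                   ("Almoço", v3 ++ l.filter (pvIn "Almoço")),
                   ("Jantar", v4 ++ l.filter (pvIn "Jantar")),
                   ("Ceia", v5 ++ l.filter (pvIn "Ceia"))] := by
  induction l generalizing v1 v2 v3 v4 v5 with
  | nil => simp
  | cons a l ih =>
      simp only [List.foldl_cons, pvStepA_eq, ih, List.filter_cons, pvApp]
      by_cases c1 : pvIn "Café da manhã" a <;> by_cases c2 : pvIn "Lanche" a <;>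
        by_cases c3 : pvIn "Almoço" a <;> by_cases c4 : pvIn "Jantar" a <;>
        by_cases c5 : pvIn "Ceia" a <;> simp [c1, c2, c3, c4, c5]

-- ===== VERDICT (by name: the statement is the Claim_ definition above) =====
theorem definir_refeicoes_spec : Claim_equal_definir_refeicoes := by
  intro xs _
  show definir_refeicoes xs = definir_refeicoes_alt xs
  show (xs.foldl pvStepA (PySem.Dict.mk
      [("Café da manhã", []), ("Lanche", []), ("Almoço", []), ("Jantar", []), ("Ceia", [])])).items = _
  rw [pv_inv]
  simp only [definir_refeicoes_alt, List.map_cons, List.map_nil]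
  refine congrArg₂ _ (congrArg _ ?_) (congrArg₂ _ (congrArg _ ?_) (congrArg₂ _ (congrArg _ ?_)
    (congrArg₂ _ (congrArg _ ?_) (congrArg₂ _ (congrArg _ ?_) rfl)))) <;>
    exact List.filter_congr (fun a _ => by simp [pvIn])
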